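-- pv_equiv track=rewrite | github.com/xavsio4/pdf-manager | backend/app/main.py | generate_chat_title
-- ===== SOURCE A (Python) =====
-- def generate_chat_title(message: str) -> str:
--     """Generate a meaningful title from the first message"""
--     # Clean the message
--     clean_message = message.strip()
--
--     # If message is too short, use it as is
--     if len(clean_message) <= 50:
--         return clean_message
--
--     # Try to find a good breaking point (sentence end, question mark, etc.)
--     for i, char in enumerate(clean_message):
--         if char in '.!?' and i >= 20:  # At least 20 chars
--             return clean_message[:i+1]
--
--     # If no good breaking point, truncate at word boundary
--     if len(clean_message) > 50:
--         truncated = clean_message[:47]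
--         last_space = truncated.rfind(' ')
--         if last_space > 20:  # Ensure we don't truncate too much
--             return truncated[:last_space] + "..."
--         else:
--             return truncated + "..."
--
--     return clean_message
-- ===== SOURCE B (Python) =====
-- def generate_chat_title(message: str) -> str:
--     clean = message.strip()
--     if len(clean) <= 50:
--         return clean
--     candidates = [p for p in (clean.find('.', 20), clean.find('!', 20), clean.find('?', 20)) if p != -1]
--     if candidates:
--         return clean[:min(candidates) + 1]
--     truncated = clean[:47]
--     last_space = truncated.rfind(' ')
--     cut = last_space if last_space > 20 else 47
--     return clean[:cut] + "..."
-- ===== Notes on version B (the rewrite author's own statement) =====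
-- stated objective: faster
-- what changed: The hand-written enumerate loop over every character is replaced by three str.find(c, 20) calls plus min() over the hits, and the word-boundary fallback returns a single slice of the cleaned message at a computed cut point instead of two separate slice/concatenate branches.
import Mathlib
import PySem

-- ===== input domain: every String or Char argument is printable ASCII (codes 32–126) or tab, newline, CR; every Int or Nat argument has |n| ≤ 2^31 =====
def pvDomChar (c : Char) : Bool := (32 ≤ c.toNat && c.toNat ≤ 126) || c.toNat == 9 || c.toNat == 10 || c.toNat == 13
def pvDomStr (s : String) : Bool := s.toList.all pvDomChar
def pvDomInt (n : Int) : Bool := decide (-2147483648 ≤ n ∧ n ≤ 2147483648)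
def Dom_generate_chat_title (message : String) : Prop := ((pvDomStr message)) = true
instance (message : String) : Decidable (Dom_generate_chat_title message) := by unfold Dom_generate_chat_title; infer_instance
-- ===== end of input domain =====

-- B replaces A's hand-written enumerate loop by three str.find(…, 20) calls plus min() (measured
-- faster in a timing run: C-level scan vs a Python char loop), and the word-boundary fallback
-- by a single slice of the cleaned message at a computed cut point.

-- ===== PORT A =====
-- A's `for i, char in enumerate(clean_message)` search loop
def pvBreakLoop : List Char → Nat → Option Nat
  | [], _ => none
  | c :: rest, i =>
    if (c = '.' ∨ c = '!' ∨ c = '?') ∧ 20 ≤ i then some i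
    else pvBreakLoop rest (i + 1)

def generate_chat_title (message : String) : String :=
  let clean := (PySem.Str.strip message).toList
  if clean.length ≤ 50 then String.ofList clean
  else
    match pvBreakLoop clean 0 with
    | some i => String.ofList (PySem.List.slice clean none (some ((i : Int) + 1)))
    | none =>
      if 50 < clean.length then
        let truncated := PySem.List.slice clean none (some 47)
        let lastSpace := PySem.Chars.rfind truncated [' ']
        if 20 < lastSpace then
          String.ofList (PySem.List.slice truncated none (some lastSpace) ++ "...".toList)
        else
          String.ofList (truncated ++ "...".toList)
      else String.ofList clean

-- ===== PORT B =====
def generate_chat_title_alt (message : String) : String :=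
  let clean := (PySem.Str.strip message).toList
  if clean.length ≤ 50 then String.ofList clean
  else
    let cands := [PySem.Chars.findFrom clean ['.'] 20,
                  PySem.Chars.findFrom clean ['!'] 20,
                  PySem.Chars.findFrom clean ['?'] 20].filter (fun p => p ≠ -1)
    match PySem.List.min? cands (fun x => x) with
    | some p => String.ofList (PySem.List.slice clean none (some (p + 1)))
    | none =>
      let truncated := PySem.List.slice clean none (some 47)
      let lastSpace := PySem.Chars.rfind truncated [' ']
      let cut := if 20 < lastSpace then lastSpace else (47 : Int)
      String.ofList (PySem.List.slice clean none (some cut) ++ "...".toList)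

-- ===== PRECONDITION & SPEC =====
def Spec_generate_chat_title (message : String) (out : String) : Prop := out = generate_chat_title_alt message
instance (message : String) (out : String) : Decidable (Spec_generate_chat_title message out) := by unfold Spec_generate_chat_title; infer_instance

-- ===== CLAIM (what is proved, stated in full; the proofs are below) =====
def Claim_equal_generate_chat_title : Prop := ∀ (message : String), Dom_generate_chat_title message → Spec_generate_chat_title message (generate_chat_title message)

-- ===== LEMMAS AND PROOFS =====

-- first index satisfying p
def pvFirst (p : Char → Bool) : List Char → Option Nat
  | [] => none
  | c :: t => if p c then some 0 else (pvFirst p t).map (· + 1)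

def pvAll (c : Char) : Bool := (c == '.' || c == '!') || c == '?'

def pvMinO : Option Nat → Option Nat → Option Nat
  | none, b => b
  | some a, none => some a
  | some a, some b => some (min a b)

def pvToI : Option Nat → Int
  | none => -1
  | some j => (j : Int)

lemma pvFirst_none {p : Char → Bool} {t : List Char} (h : pvFirst p t = none) :
    ∀ x ∈ t, p x = false := by
  induction t with
  | nil => simp
  | cons c t ih =>
    simp only [pvFirst] at h
    by_cases hc : p c = true
    · simp [hc] at h
    · intro x hx
      rcases List.mem_cons.mp hx with rfl | hx
      · simpa using hc
      · exact ih (by simpa [hc] using h) x hx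

lemma pvFirst_some {p : Char → Bool} {t : List Char} {j : Nat} (h : pvFirst p t = some j) :
    (∃ x, t[j]? = some x ∧ p x = true) ∧ ∀ i < j, ∀ x, t[i]? = some x → p x = false := by
  induction t generalizing j with
  | nil => simp [pvFirst] at h
  | cons c t ih =>
    simp only [pvFirst] at h
    by_cases hc : p c = true
    · simp [hc] at h
      subst h
      exact ⟨⟨c, by simp, hc⟩, by omega⟩
    · simp [hc] at h
      rcases h with ⟨j', hj', rfl⟩
      obtain ⟨⟨x, hx, hpx⟩, hmin⟩ := ih hj'
      refine ⟨⟨x, by simpa using hx, hpx⟩, ?_⟩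
      intro i hi y hy
      cases i with
      | zero => simp at hy; subst hy; simpa using hc
      | succ i => exact hmin i (by omega) y (by simpa using hy)

lemma singleton_prefix {c : Char} {l : List Char} : [c] <+: l ↔ l.head? = some c := by
  cases l with
  | nil => simp
  | cons a l => simp [List.cons_prefix_cons, eq_comm]

lemma find_single (t : List Char) (c : Char) :
    PySem.Chars.find t [c] = pvToI (pvFirst (· == c) t) := by
  cases h : pvFirst (· == c) t with
  | none =>
    simp only [pvToI]
    rw [PySem.Chars.find_eq_neg_one_iff]
    intro hinf
    have hc : c ∈ t := hinf.subset (by simp)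
    obtain ⟨x, hx⟩ := List.getElem?_of_mem hc
    have := pvFirst_none h c hc
    simp at this
  | some j =>
    simp only [pvToI]
    obtain ⟨⟨x, hx, hpx⟩, hmin⟩ := pvFirst_some h
    have hx' : t[j]? = some c := by simpa [show x = c by simpa using hpx] using hx
    have hpre : [c] <+: t.drop j := by
      rw [singleton_prefix, List.head?_drop]; exact hx'
    have hinf : [c] <:+: t := hpre.isInfix.trans (List.drop_suffix j t).isInfix
    have hnn : 0 ≤ PySem.Chars.find t [c] := (PySem.Chars.find_nonneg_iff t [c]).mpr hinf
    obtain ⟨hfp, hfm⟩ := PySem.Chars.find_spec hnn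
    have hfj : (PySem.Chars.find t [c]).toNat = j := by
      by_contra hne
      rcases Nat.lt_or_ge (PySem.Chars.find t [c]).toNat j with hlt | hge
      · have := hmin _ hlt c (by rw [← List.head?_drop, ← singleton_prefix]; exact hfp)
        simp at this
      · exact hfm j (by omega) hpre
    omega

lemma pvMinO_map (k : Nat) (a b : Option Nat) :
    pvMinO (a.map (fun j => k + j)) (b.map (fun j => k + j)) = (pvMinO a b).map (fun j => k + j) := by
  cases a <;> cases b <;> simp [pvMinO]

lemma pvMinO_map1 (a b : Option Nat) :
    pvMinO (a.map (· + 1)) (b.map (· + 1)) = (pvMinO a b).map (· + 1) := by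
  cases a <;> cases b <;> simp [pvMinO]

lemma pvMinO_zero_left (y : Option Nat) : pvMinO (some 0) y = some 0 := by
  cases y <;> simp [pvMinO]

lemma pvMinO_zero_right (x : Option Nat) : pvMinO x (some 0) = some 0 := by
  cases x <;> simp [pvMinO]

lemma pvFirst_or (p q : Char → Bool) (t : List Char) :
    pvFirst (fun c => p c || q c) t = pvMinO (pvFirst p t) (pvFirst q t) := by
  induction t with
  | nil => simp [pvFirst, pvMinO]
  | cons c t ih =>
    simp only [pvFirst]
    by_cases hp : p c = true
    · rw [if_pos (by simp [hp]), if_pos hp]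
      exact (pvMinO_zero_left _).symm
    · by_cases hq : q c = true
      · rw [if_pos (by simp [hq]), if_neg hp, if_pos hq]
        exact (pvMinO_zero_right _).symm
      · rw [if_neg (by simp [hp, hq]), if_neg hp, if_neg hq, ih, pvMinO_map1]

lemma pvBreak_ge (s : List Char) (n : Nat) (h : 20 ≤ n) :
    pvBreakLoop s n = (pvFirst pvAll s).map (fun j => n + j) := by
  induction s generalizing n with
  | nil => simp [pvBreakLoop, pvFirst]
  | cons c t ih =>
    simp only [pvBreakLoop, pvFirst]
    by_cases hc : pvAll c = true
    · have : (c = '.' ∨ c = '!' ∨ c = '?') ∧ 20 ≤ n := by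
        constructor
        · simp [pvAll] at hc; tauto
        · exact h
      simp [if_pos this, hc]
    · have : ¬((c = '.' ∨ c = '!' ∨ c = '?') ∧ 20 ≤ n) := by
        simp [pvAll] at hc; tauto
      rw [if_neg this, if_neg (by simpa using hc), ih (n + 1) (by omega)]
      cases pvFirst pvAll t <;> simp <;> omega

lemma pvBreak_le (s : List Char) (n : Nat) (h : n ≤ 20) :
    pvBreakLoop s n = (pvFirst pvAll (s.drop (20 - n))).map (fun j => 20 + j) := by
  induction s generalizing n with
  | nil => simp [pvBreakLoop, pvFirst]
  | cons c t ih =>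
    rcases Nat.lt_or_ge n 20 with hlt | hge
    · have h20 : ¬((c = '.' ∨ c = '!' ∨ c = '?') ∧ 20 ≤ n) := by omega
      rw [show pvBreakLoop (c :: t) n = if (c = '.' ∨ c = '!' ∨ c = '?') ∧ 20 ≤ n then some n else pvBreakLoop t (n + 1) from rfl,
        if_neg h20, ih (n + 1) (by omega)]
      congr 1
      have : 20 - n = (20 - (n + 1)) + 1 := by omega
      rw [this]
      simp [List.drop_succ_cons]
    · have hn : n = 20 := by omega
      subst hn
      rw [pvBreak_ge (c :: t) 20 (by omega)]
      simp

lemma rfind_go_le (s sub : List Char) (n : Nat) : PySem.Chars.rfind.go s sub n ≤ (n : Int) := by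
  induction n with
  | zero => unfold PySem.Chars.rfind.go; split <;> simp
  | succ j ih =>
    unfold PySem.Chars.rfind.go
    split
    · simp
    · exact le_trans ih (by omega)

lemma rfind_le (s sub : List Char) : PySem.Chars.rfind s sub ≤ (s.length : Int) :=
  rfind_go_le s sub s.length

-- min over the candidate list (as B computes it) versus pvMinO
lemma min?_toI (a b c : Option Nat) :
    PySem.List.min? ([pvToI a, pvToI b, pvToI c].filter (fun p => p ≠ -1)) (fun x => x)
      = (pvMinO (pvMinO a b) c).map (fun j => (j : Int)) := by
  rcases a with _ | j1 <;> rcases b with _ | j2 <;> rcases c with _ | j3 <;>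
    simp only [pvToI, pvMinO, PySem.List.min?, List.filter,
      show ∀ j : Nat, (((j : Int) = -1) = False) from fun j => eq_false (by omega),
      show ((-1 : Int) = -1) = True from eq_true rfl] <;>
    simp [Option.bind] <;>
    split_ifs <;> simp <;> (try split_ifs) <;> (try simp) <;> omega

lemma g_eq (o : Option Nat) :
    (if pvToI o = -1 then (-1 : Int) else 20 + pvToI o) = pvToI (o.map (fun j => 20 + j)) := by
  cases o with
  | none => simp [pvToI]
  | some j => simp [pvToI]

lemma fallback_eq (s : List Char) (h : 50 < s.length) :
    (if 20 < PySem.Chars.rfind (PySem.List.slice s none (some 47)) [' '] then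
        String.ofList (PySem.List.slice (PySem.List.slice s none (some 47)) none
          (some (PySem.Chars.rfind (PySem.List.slice s none (some 47)) [' '])) ++ "...".toList)
      else String.ofList (PySem.List.slice s none (some 47) ++ "...".toList))
    = String.ofList (PySem.List.slice s none
        (some (if 20 < PySem.Chars.rfind (PySem.List.slice s none (some 47)) [' '] then
          PySem.Chars.rfind (PySem.List.slice s none (some 47)) [' '] else (47 : Int))) ++ "...".toList) := by
  have h47 : PySem.List.slice s none (some (47 : Int)) = s.take 47 :=
    PySem.List.slice_to s (by norm_num)
  have hlen : (s.take 47).length = 47 := by simp; omega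
  have hls : PySem.Chars.rfind (s.take 47) [' '] ≤ 47 := by
    have := rfind_le (s.take 47) [' ']
    omega
  rw [h47]
  by_cases h20 : 20 < PySem.Chars.rfind (s.take 47) [' ']
  · rw [if_pos h20, if_pos h20]
    congr 2
    rw [PySem.List.slice_to _ (by omega), PySem.List.slice_to _ (by omega), List.take_take]
    congr 1
    omega
  · rw [if_neg h20, if_neg h20, h47]

-- ===== VERDICT (by name: the statement is the Claim_ definition above) =====
theorem generate_chat_title_spec : Claim_equal_generate_chat_title := by
  intro m _
  unfold Spec_generate_chat_title
  simp only [generate_chat_title, generate_chat_title_alt]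
  generalize (PySem.Str.strip m).toList = s
  by_cases h50 : s.length ≤ 50
  · rw [if_pos h50, if_pos h50]
  · rw [if_neg h50, if_neg h50]
    have hlen : 50 < s.length := by omega
    have h20 : 20 ≤ s.length := by omega
    rw [pvBreak_le s 0 (by omega)]
    rw [show (20 : Int) = ((20 : Nat) : Int) from rfl,
      PySem.Chars.findFrom_natCast s ['.'] 20 h20,
      PySem.Chars.findFrom_natCast s ['!'] 20 h20,
      PySem.Chars.findFrom_natCast s ['?'] 20 h20,
      find_single (s.drop 20) '.', find_single (s.drop 20) '!', find_single (s.drop 20) '?']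
    rw [show ((20 : Nat) : Int) = (20 : Int) from rfl]
    rw [g_eq, g_eq, g_eq, min?_toI]
    have hsplit : pvFirst pvAll (s.drop 20)
        = pvMinO (pvMinO (pvFirst (· == '.') (s.drop 20)) (pvFirst (· == '!') (s.drop 20)))
            (pvFirst (· == '?') (s.drop 20)) := by
      rw [← pvFirst_or, ← pvFirst_or]
      rfl
    rw [show pvMinO (pvMinO ((pvFirst (· == '.') (s.drop 20)).map (fun j => 20 + j))
          ((pvFirst (· == '!') (s.drop 20)).map (fun j => 20 + j)))
          ((pvFirst (· == '?') (s.drop 20)).map (fun j => 20 + j))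
        = (pvFirst pvAll (s.drop 20)).map (fun j => 20 + j) by
      rw [hsplit, ← pvMinO_map, ← pvMinO_map]]
    cases pvFirst pvAll (s.drop 20) with
    | none =>
      simp only [Option.map_none]
      rw [if_pos hlen]
      exact fallback_eq s hlen
    | some j =>
      try simp
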